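-- pv_equiv track=rewrite | github.com/Steve2608/AoC-2020 | 24/24.py | fill_floor
-- ===== SOURCE A (Python) =====
-- from typing import Literal, Sequence
--
-- class HexCoordinate:
--
--     def __init__(self, x: int = 0, y: int = 0, z: int = 0):
--         self._x = x
--         self._y = y
--         self._z = z
--
--     @property
--     def xyz(self) -> tuple[int, int, int]:
--         return self._x, self._y, self._z
--
--     def move(self, direction: Literal['e', 'se', 'sw', 'w', 'nw', 'ne']) -> None:
--         if direction == 'e':
--             self._x += 1
--             self._y -= 1
--         elif direction == 'w':
--             self._x -= 1
--             self._y += 1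
--         elif direction == 'sw':
--             self._x -= 1
--             self._z += 1
--         elif direction == 'ne':
--             self._x += 1
--             self._z -= 1
--         elif direction == 'se':
--             self._y -= 1
--             self._z += 1
--         else:
--             self._y += 1
--             self._z -= 1
--
--     def neighbor_coords(self) -> tuple[tuple[int, int, int], ...]:
--         return (self._x + 1, self._y - 1, self._z), \
--             (self._x - 1, self._y + 1, self._z), \
--             (self._x - 1, self._y, self._z + 1), \
--             (self._x + 1, self._y, self._z - 1), \
--             (self._x, self._y - 1, self._z + 1), \
--             (self._x, self._y + 1, self._z - 1)
--
-- def fill_floor(lines: Sequence[tuple[str]]) -> dict[tuple[int, int, int], bool]: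
--     # true equals black side up
--     grid = {}
--
--     for line in lines:
--         curr = HexCoordinate()
--         for direction in line:
--             curr.move(direction)
--
--         # flip tile
--         coords = curr.xyz
--         grid[coords] = not grid.get(coords, False)
--
--     return grid
-- ===== SOURCE B (Python) =====
-- def fill_floor(lines):
--     # Closed form: a line's endpoint depends only on how many of each direction it
--     # contains, so count directions instead of walking the path; every token not in
--     # the five named directions falls to the 'nw' else-branch and is counted by length.
--     def endpoint(line):
--         e = line.count('e')
--         w = line.count('w')
--         sw = line.count('sw')
--         ne = line.count('ne')
--         se = line.count('se')
--         nw = len(line) - e - w - sw - ne - se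
--         return (e - w - sw + ne, -e + w - se + nw, sw - ne + se - nw)
--
--     coords = [endpoint(line) for line in lines]
--     return {c: coords.count(c) % 2 == 1 for c in coords}
-- ===== Notes on version B (the rewrite author's own statement) =====
-- stated objective: alternative
-- what changed: B never walks a path or toggles a running dict: each line's endpoint is a closed form of its direction counts (line.count per direction, len for the nw else-branch), and the result is built in a second pass as a comprehension keyed by endpoints whose value is the parity of how often that endpoint occurs in the endpoint list.
import Mathlib
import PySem

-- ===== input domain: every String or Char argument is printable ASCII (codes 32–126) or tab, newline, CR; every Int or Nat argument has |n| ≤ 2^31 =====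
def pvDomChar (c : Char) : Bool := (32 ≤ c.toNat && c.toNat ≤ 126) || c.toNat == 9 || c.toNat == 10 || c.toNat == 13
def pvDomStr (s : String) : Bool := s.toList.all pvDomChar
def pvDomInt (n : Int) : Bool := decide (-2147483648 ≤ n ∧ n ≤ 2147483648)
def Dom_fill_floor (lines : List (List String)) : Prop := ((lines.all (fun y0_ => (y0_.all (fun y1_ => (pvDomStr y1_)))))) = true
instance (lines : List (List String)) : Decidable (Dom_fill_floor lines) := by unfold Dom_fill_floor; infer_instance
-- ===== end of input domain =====

-- B drops the path walk and the running dict toggle: each line's endpoint is a closed form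
-- of its direction counts, and the result is a comprehension keyed by endpoints whose value
-- is the parity of how often that endpoint occurs (objective: alternative; not faster).

-- ===== PORT A =====
def pvMove (c : Int × Int × Int) (direction : String) : Int × Int × Int :=
  if direction = "e" then (c.1 + 1, c.2.1 - 1, c.2.2)
  else if direction = "w" then (c.1 - 1, c.2.1 + 1, c.2.2)
  else if direction = "sw" then (c.1 - 1, c.2.1, c.2.2 + 1)
  else if direction = "ne" then (c.1 + 1, c.2.1, c.2.2 - 1)
  else if direction = "se" then (c.1, c.2.1 - 1, c.2.2 + 1)
  else (c.1, c.2.1 + 1, c.2.2 - 1)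

def fill_floor (lines : List (List String)) : List (Int × Int × Int × Bool) :=
  let grid : PySem.Dict (Int × Int × Int) Bool :=
    lines.foldl (fun grid line =>
      let coords := line.foldl pvMove (0, 0, 0)
      grid.insert coords (! grid.getD coords false)) PySem.Dict.empty
  grid.items.map (fun p => (p.1.1, p.1.2.1, p.1.2.2, p.2))

-- ===== PORT B =====
def pvEndpoint (line : List String) : Int × Int × Int :=
  let e : Int := PySem.List.count line "e"
  let w : Int := PySem.List.count line "w"
  let sw : Int := PySem.List.count line "sw"
  let ne : Int := PySem.List.count line "ne"
  let se : Int := PySem.List.count line "se"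
  let nw : Int := PySem.List.len line - e - w - sw - ne - se
  (e - w - sw + ne, -e + w - se + nw, sw - ne + se - nw)

def fill_floor_alt (lines : List (List String)) : List (Int × Int × Int × Bool) :=
  let coords := lines.map pvEndpoint
  let d : PySem.Dict (Int × Int × Int) Bool :=
    coords.foldl (fun d c =>
      d.insert c (decide (PySem.Int.mod (PySem.List.count coords c) 2 = 1))) PySem.Dict.empty
  d.items.map (fun p => (p.1.1, p.1.2.1, p.1.2.2, p.2))

-- ===== PRECONDITION & SPEC =====
def Spec_fill_floor (lines : List (List String)) (out : List (Int × Int × Int × Bool)) : Prop := out = fill_floor_alt lines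
instance (lines : List (List String)) (out : List (Int × Int × Int × Bool)) : Decidable (Spec_fill_floor lines out) := by unfold Spec_fill_floor; infer_instance

-- ===== CLAIM (what is proved, stated in full; the proofs are below) =====
def Claim_equal_fill_floor : Prop := ∀ (lines : List (List String)), Dom_fill_floor lines → Spec_fill_floor lines (fill_floor lines)

-- ===== LEMMAS AND PROOFS =====

def pvParity (n : Int) : Bool := decide (PySem.Int.mod n 2 ≠ 0)

def pvLP (p : (Int × Int × Int) × Int) : (Int × Int × Int) × Bool := (p.1, pvParity p.2)

def pvMapP (m : PySem.Dict (Int × Int × Int) Int) : PySem.Dict (Int × Int × Int) Bool :=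
  PySem.Dict.mk (m.items.map pvLP)

lemma pvParity_succ (n : Int) : pvParity (n + 1) = ! pvParity n := by
  unfold pvParity
  rw [PySem.Int.mod_eq_emod_of_pos (by omega), PySem.Int.mod_eq_emod_of_pos (by omega)]
  by_cases h : n % 2 = 0
  · have h1 : (n + 1) % 2 = 1 := by omega
    simp [h, h1]
  · have h0 : n % 2 = 1 := by omega
    have h1 : (n + 1) % 2 = 0 := by omega
    simp [h0, h1]

lemma pvEndpoint_cons (d : String) (rest : List String) :
    pvEndpoint (d :: rest) = ((pvMove (0,0,0) d).1 + (pvEndpoint rest).1,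
      (pvMove (0,0,0) d).2.1 + (pvEndpoint rest).2.1,
      (pvMove (0,0,0) d).2.2 + (pvEndpoint rest).2.2) := by
  by_cases h1 : d = "e"
  · subst h1
    simp [pvEndpoint, pvMove, PySem.List.len, Prod.ext_iff]
    omega
  by_cases h2 : d = "w"
  · subst h2
    simp [pvEndpoint, pvMove, PySem.List.len, Prod.ext_iff]
    omega
  by_cases h3 : d = "sw"
  · subst h3
    simp [pvEndpoint, pvMove, PySem.List.len, Prod.ext_iff]
    omega
  by_cases h4 : d = "ne"
  · subst h4
    simp [pvEndpoint, pvMove, PySem.List.len, Prod.ext_iff]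
    omega
  by_cases h5 : d = "se"
  · subst h5
    simp [pvEndpoint, pvMove, PySem.List.len, Prod.ext_iff]
    omega
  have e1 : (d == "e") = false := beq_eq_false_iff_ne.mpr h1
  have e2 : (d == "w") = false := beq_eq_false_iff_ne.mpr h2
  have e3 : (d == "sw") = false := beq_eq_false_iff_ne.mpr h3
  have e4 : (d == "ne") = false := beq_eq_false_iff_ne.mpr h4
  have e5 : (d == "se") = false := beq_eq_false_iff_ne.mpr h5
  simp [pvEndpoint, pvMove, h1, h2, h3, h4, h5,
        PySem.List.len, Prod.ext_iff]
  omega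

lemma pvEndpoint_nil : pvEndpoint [] = (0, 0, 0) := by
  simp [pvEndpoint, PySem.List.len]

lemma pvFoldlMove (line : List String) (s : Int × Int × Int) :
    line.foldl pvMove s = (s.1 + (pvEndpoint line).1, s.2.1 + (pvEndpoint line).2.1,
      s.2.2 + (pvEndpoint line).2.2) := by
  induction line generalizing s with
  | nil => simp [pvEndpoint_nil]
  | cons d rest ih =>
    rw [List.foldl_cons, ih (pvMove s d), pvEndpoint_cons]
    by_cases h1 : d = "e"
    · subst h1; simp [pvMove, Prod.ext_iff]; omega
    by_cases h2 : d = "w"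
    · subst h2; simp [pvMove, h1, Prod.ext_iff]; omega
    by_cases h3 : d = "sw"
    · subst h3; simp [pvMove, h1, h2, Prod.ext_iff]; omega
    by_cases h4 : d = "ne"
    · subst h4; simp [pvMove, h1, h2, h3, Prod.ext_iff]; omega
    by_cases h5 : d = "se"
    · subst h5; simp [pvMove, h1, h2, h3, h4, Prod.ext_iff]; omega
    simp [pvMove, h1, h2, h3, h4, h5, Prod.ext_iff]; omega

lemma pvBodyA_eq :
    (fun (grid : PySem.Dict (Int × Int × Int) Bool) (line : List String) =>
      let coords := line.foldl pvMove (0, 0, 0)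
      grid.insert coords (! grid.getD coords false))
    = (fun grid line => grid.insert (pvEndpoint line) (! grid.getD (pvEndpoint line) false)) := by
  funext grid line
  have h : line.foldl pvMove (0, 0, 0) = pvEndpoint line := by
    rw [pvFoldlMove]; simp
  simp only [h]

lemma pvFind_map (l : List ((Int × Int × Int) × Int)) (c : Int × Int × Int) :
    List.find? (fun p => p.1 == c) (l.map pvLP)
      = (List.find? (fun p => p.1 == c) l).map pvLP := by
  induction l with
  | nil => rfl
  | cons p rest ih => by_cases h : p.1 == c <;> simp [pvLP, h, ih]

lemma pvContains_mapP (m : PySem.Dict (Int × Int × Int) Int) (c : Int × Int × Int) :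
    (pvMapP m).contains c = m.contains c := by
  simp only [pvMapP, PySem.Dict.contains, List.any_map]
  rfl

lemma pvGetD_mapP (m : PySem.Dict (Int × Int × Int) Int) (c : Int × Int × Int) :
    (pvMapP m).getD c false = pvParity (m.getD c 0) := by
  simp only [pvMapP, PySem.Dict.getD, PySem.Dict.get?, pvFind_map]
  cases List.find? (fun p => p.1 == c) m.items <;> simp [pvLP, pvParity]

lemma pvStep_mapP (m : PySem.Dict (Int × Int × Int) Int) (c : Int × Int × Int) :
    (pvMapP m).insert c (! (pvMapP m).getD c false) = pvMapP (m.modify c 0 (· + 1)) := by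
  rw [pvGetD_mapP, ← pvParity_succ]
  simp only [PySem.Dict.modify, PySem.Dict.insert, pvContains_mapP]
  by_cases h : m.contains c
  · simp only [h, if_true, pvMapP, List.map_map]
    congr 1
    apply List.map_congr_left
    intro p _
    by_cases hp : p.1 == c <;> simp [hp, pvLP, Function.comp]
  · simp [h, pvMapP, pvLP]

lemma pvFold_mapP (lines : List (List String)) (m : PySem.Dict (Int × Int × Int) Int) :
    lines.foldl (fun grid line =>
        grid.insert (pvEndpoint line) (! grid.getD (pvEndpoint line) false)) (pvMapP m)
    = pvMapP (lines.foldl (fun counts line => counts.modify (pvEndpoint line) 0 (· + 1)) m) := by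
  induction lines generalizing m with
  | nil => rfl
  | cons line rest ih =>
    simp only [List.foldl_cons, pvStep_mapP]
    exact ih _

-- B's comprehension: folding inserts whose value is a function of the key alone
lemma pvFoldInsertConst (v : (Int × Int × Int) → Bool) (xs : List (Int × Int × Int)) :
    xs.foldl (fun d c => d.insert c (v c)) PySem.Dict.empty
      = PySem.Dict.mk ((PySem.Set.ofList xs).map (fun k => (k, v k))) := by
  induction xs using List.reverseRecOn with
  | nil => rfl
  | append_singleton xs c ih =>
    rw [List.foldl_append, List.foldl_cons, List.foldl_nil, ih]
    have hset : PySem.Set.ofList (xs ++ [c]) = PySem.Set.add (PySem.Set.ofList xs) c := by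
      rw [PySem.Set.ofList_eq_foldl, List.foldl_append, ← PySem.Set.ofList_eq_foldl]
      rfl
    rw [hset]
    by_cases hc : c ∈ PySem.Set.ofList xs
    · have hcontains : (PySem.Dict.mk ((PySem.Set.ofList xs).map
          (fun k => (k, v k)))).contains c = true := by
        simp [PySem.Dict.contains, List.any_map]
        exact (PySem.Set.mem_ofList xs c).mp hc
      have hsAdd : PySem.Set.add (PySem.Set.ofList xs) c = PySem.Set.ofList xs := by
        simp [PySem.Set.add, hc]
      rw [hsAdd]
      simp only [PySem.Dict.insert, hcontains, if_true, List.map_map]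
      congr 1
      apply List.map_congr_left
      intro k _
      by_cases hk : k = c
      · subst hk; simp
      · simp [Function.comp, beq_eq_false_iff_ne.mpr hk]
    · have hcontains : (PySem.Dict.mk ((PySem.Set.ofList xs).map
          (fun k => (k, v k)))).contains c = false := by
        simp [PySem.Dict.contains, List.any_map]
        intro a b d hmem heq
        exact hc ((PySem.Set.mem_ofList xs c).mpr (heq ▸ hmem))
      have hsAdd : PySem.Set.add (PySem.Set.ofList xs) c = PySem.Set.ofList xs ++ [c] := by
        simp [PySem.Set.add, hc]
      rw [hsAdd]
      simp [PySem.Dict.insert, hcontains]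

lemma pvValue_eq (coords : List (Int × Int × Int)) (k : Int × Int × Int) :
    (decide (PySem.Int.mod (PySem.List.count coords k) 2 = 1) : Bool)
      = pvParity ((List.count k coords : Nat) : Int) := by
  rw [PySem.List.count_eq]
  unfold pvParity
  rw [show ((2 : Int)) = ((2 : Nat) : Int) by norm_num, PySem.Int.mod_natCast]
  rcases Nat.mod_two_eq_zero_or_one (List.count k coords) with h | h <;> simp [h]

-- ===== VERDICT (by name: the statement is the Claim_ definition above) =====
theorem fill_floor_spec : Claim_equal_fill_floor := by
  intro lines _
  unfold Spec_fill_floor fill_floor fill_floor_alt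
  have hA : lines.foldl (fun grid line =>
        let coords := line.foldl pvMove (0, 0, 0)
        grid.insert coords (! grid.getD coords false)) PySem.Dict.empty
      = pvMapP (PySem.Dict.counter (lines.map pvEndpoint)) := by
    rw [pvBodyA_eq,
        show (PySem.Dict.empty : PySem.Dict (Int × Int × Int) Bool) = pvMapP PySem.Dict.empty
          from rfl,
        pvFold_mapP, PySem.Dict.counter_eq_foldl, List.foldl_map]
  have hB := pvFoldInsertConst
    (fun c => decide (PySem.Int.mod (PySem.List.count (lines.map pvEndpoint) c) 2 = 1))
    (lines.map pvEndpoint)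
  show ((lines.foldl (fun grid line =>
      let coords := line.foldl pvMove (0, 0, 0)
      grid.insert coords (! grid.getD coords false)) PySem.Dict.empty).items.map
        (fun p => (p.1.1, p.1.2.1, p.1.2.2, p.2)))
    = (((lines.map pvEndpoint).foldl (fun d c =>
        d.insert c (decide (PySem.Int.mod (PySem.List.count (lines.map pvEndpoint) c) 2 = 1)))
        PySem.Dict.empty).items.map (fun p => (p.1.1, p.1.2.1, p.1.2.2, p.2)))
  rw [hA, hB]
  simp only [pvMapP, PySem.Dict.items_counter, List.map_map]
  apply List.map_congr_left
  intro k _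
  simp only [Function.comp, pvLP]
  rw [pvValue_eq]
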